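-- pv_equiv track=rewrite | github.com/SamuelKupferschmid/hashcode-2020-prep | 02_slideshow/mateusz/my_cleanup.py | create_slide_buckets
-- ===== SOURCE A (Python) =====
-- SLIDE_ID = 0
--
-- SLIDE_NUMBER_OF_TAGS = 3
--
-- def create_slide_buckets(slides):
--     buckets = {}
--
--     for slide in slides:
--         n = slide[SLIDE_NUMBER_OF_TAGS]
--
--         if n in buckets.keys():
--             buckets[n].append(slide[SLIDE_ID])
--         else:
--             buckets[n] = []
--             buckets[n].append(slide[SLIDE_ID])
--
--     return buckets
-- ===== SOURCE B (Python) =====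
-- SLIDE_ID = 0
--
-- SLIDE_NUMBER_OF_TAGS = 3
--
-- def create_slide_buckets(slides):
--     # Two-pass alternative: first collect the distinct tag counts in first-occurrence
--     # order, then build each bucket by one scan per key.
--     keys = []
--     for slide in slides:
--         n = slide[SLIDE_NUMBER_OF_TAGS]
--         if n not in keys:
--             keys.append(n)
--     return {n: [slide[SLIDE_ID] for slide in slides
--                 if slide[SLIDE_NUMBER_OF_TAGS] == n]
--             for n in keys}
-- ===== Notes on version B (the rewrite author's own statement) =====
-- stated objective: alternative
-- what changed: Replaces A's single hash-dict accumulation pass with a two-pass strategy: one pass collecting distinct tag counts in first-occurrence order, then one comprehension scan of the slide list per key to build each bucket.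
import Mathlib
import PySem

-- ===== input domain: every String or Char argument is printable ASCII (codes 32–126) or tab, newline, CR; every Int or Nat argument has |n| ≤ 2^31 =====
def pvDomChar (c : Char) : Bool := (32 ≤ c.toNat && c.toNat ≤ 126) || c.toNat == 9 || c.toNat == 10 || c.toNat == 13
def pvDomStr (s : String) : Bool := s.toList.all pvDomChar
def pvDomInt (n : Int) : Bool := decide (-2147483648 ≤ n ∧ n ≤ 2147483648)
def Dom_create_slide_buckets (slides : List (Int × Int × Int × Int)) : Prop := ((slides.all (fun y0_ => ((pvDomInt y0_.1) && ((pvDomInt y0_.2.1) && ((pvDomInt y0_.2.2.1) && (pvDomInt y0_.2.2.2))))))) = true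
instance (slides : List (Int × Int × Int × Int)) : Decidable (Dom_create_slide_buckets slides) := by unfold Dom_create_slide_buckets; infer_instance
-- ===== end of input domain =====

-- B builds the same buckets by a two-pass key-collection + per-key scan instead of A's one hash-dict pass (alternative decomposition, same result).
-- ===== PORT A =====
-- A: single pass, appending slide[SLIDE_ID] to buckets[n] (created empty first if absent); returns the dict (items in insertion order).
def create_slide_buckets (slides : List (Int × Int × Int × Int)) : List (Int × List Int) :=
  (slides.foldl (fun buckets slide =>
      let n := slide.2.2.2
      if buckets.contains n then
        buckets.modify n [] (fun l => l ++ [slide.1])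
      else
        ((buckets.insert n []).modify n [] (fun l => l ++ [slide.1])))
    (PySem.Dict.empty : PySem.Dict Int (List Int))).items

-- ===== PORT B =====
-- B: collect distinct tag counts in first-occurrence order, then one filter scan per key.
def create_slide_buckets_alt (slides : List (Int × Int × Int × Int)) : List (Int × List Int) :=
  let keys := slides.foldl (fun ks slide =>
      let n := slide.2.2.2
      if ks.contains n then ks else ks ++ [n]) ([] : List Int)
  keys.map (fun n =>
    (n, (slides.filter (fun slide => slide.2.2.2 == n)).map (fun slide => slide.1)))

-- ===== PRECONDITION & SPEC =====
def Spec_create_slide_buckets (slides : List (Int × Int × Int × Int)) (out : List (Int × List Int)) : Prop := out = create_slide_buckets_alt slides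
instance (slides : List (Int × Int × Int × Int)) (out : List (Int × List Int)) : Decidable (Spec_create_slide_buckets slides out) := by unfold Spec_create_slide_buckets; infer_instance

-- ===== CLAIM (what is proved, stated in full; the proofs are below) =====
def Claim_equal_create_slide_buckets : Prop := ∀ (slides : List (Int × Int × Int × Int)), Dom_create_slide_buckets slides → Spec_create_slide_buckets slides (create_slide_buckets slides)

-- ===== LEMMAS AND PROOFS =====

-- ===== VERDICT (by name: the statement is the Claim_ definition above) =====
-- step of A's loop equals a single dict `modify` (the else-branch creates the key then appends)
theorem pvStepA_eq :
    (fun (buckets : PySem.Dict Int (List Int)) (slide : Int × Int × Int × Int) =>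
      let n := slide.2.2.2
      if buckets.contains n then
        buckets.modify n [] (fun l => l ++ [slide.1])
      else
        ((buckets.insert n []).modify n [] (fun l => l ++ [slide.1])))
    = fun buckets slide => buckets.modify slide.2.2.2 [] (fun l => l ++ [slide.1]) := by
  funext d s
  by_cases h : d.contains s.2.2.2
  · simp [h]
  · simp only [Bool.not_eq_true] at h
    simp [h, PySem.Dict.modify, PySem.Dict.getD_insert_self, PySem.Dict.insert_insert_self,
      PySem.Dict.getD_of_not_contains d ([] : List Int) h]

-- step of B's key-collection loop is PySem.Set.add
theorem pvStepB_eq :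
    (fun (ks : List Int) (slide : Int × Int × Int × Int) =>
      let n := slide.2.2.2
      if ks.contains n then ks else ks ++ [n])
    = fun (ks : List Int) slide => PySem.Set.add ks slide.2.2.2 := by
  funext ks s
  simp [PySem.Set.add]

theorem pvGetD_eq (slides : List (Int × Int × Int × Int)) (k : Int) :
    (slides.foldl (fun d s => d.modify s.2.2.2 [] (fun l => l ++ [s.1]))
      (PySem.Dict.empty : PySem.Dict Int (List Int))).getD k []
    = (slides.filter (fun s => s.2.2.2 == k)).map (fun s => s.1) := by
  have h := PySem.Dict.getD_foldl_modify_append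
    (slides.map (fun s => (s.2.2.2, s.1))) (PySem.Dict.empty : PySem.Dict Int (List Int)) k
  rw [List.foldl_map] at h
  simpa [List.filter_map, Function.comp] using h

theorem create_slide_buckets_spec : Claim_equal_create_slide_buckets := by
  intro slides _
  unfold Spec_create_slide_buckets create_slide_buckets create_slide_buckets_alt
  rw [pvStepA_eq, pvStepB_eq, ← PySem.Set.update_map_eq_foldl_add, PySem.Set.update_nil_left]
  have hnd : (slides.foldl (fun d s => d.modify s.2.2.2 [] (fun l => l ++ [s.1]))
      (PySem.Dict.empty : PySem.Dict Int (List Int))).keys.Nodup :=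
    PySem.Dict.nodup_keys_foldl_modify_key slides (fun s => s.2.2.2) []
      (fun _ s => fun l => l ++ [s.1]) PySem.Dict.empty (by simp)
  rw [PySem.Dict.items_eq_map_keys _ hnd ([] : List Int),
    PySem.Dict.keys_foldl_modify_key slides (fun s => s.2.2.2) []
      (fun _ s => fun l => l ++ [s.1]) PySem.Dict.empty]
  have hkeys : PySem.Set.update (PySem.Dict.empty : PySem.Dict Int (List Int)).keys
      (slides.map (fun s => s.2.2.2)) = PySem.Set.ofList (slides.map (fun s => s.2.2.2)) := by
    simp [PySem.Set.update_nil_left]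
  rw [hkeys]
  exact List.map_congr_left (fun k _ => by rw [pvGetD_eq])
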